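-- pv_equiv track=rewrite | github.com/iWoz/doudizhu_solver | doudizhu_solver.py | create_straight
-- ===== SOURCE A (Python) =====
-- def create_straight(list_of_nums, min_length):
--
--     a = sorted(list_of_nums)
--     lens = len(a)
--     for start in range(0, lens):
--         for end in range(start, lens):
--             if a[end] - a[start] != end - start:
--                 break
--             elif end - start >= min_length - 1:
--                 yield list(range(a[start], a[end] + 1))
-- ===== SOURCE B (Python) =====
-- def create_straight(list_of_nums, min_length):
--     a = sorted(list_of_nums)
--     need = max(min_length, 1)
--     i, n = 0, len(a)
--     while i < n:
--         j = i + 1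
--         while j < n and a[j] == a[j - 1] + 1:
--             j += 1
--         lo, top = a[i], a[j - 1]
--         for s in range(lo, top + 1):
--             for e in range(s + need - 1, top + 1):
--                 yield list(range(s, e + 1))
--         i = j
-- ===== Notes on version B (the rewrite author's own statement) =====
-- stated objective: alternative
-- what changed: Instead of rescanning the sorted list from every start index, B makes a single pass that detects each maximal consecutive run once and then emits the qualifying windows directly by value arithmetic over the run's bounds.
import Mathlib
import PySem

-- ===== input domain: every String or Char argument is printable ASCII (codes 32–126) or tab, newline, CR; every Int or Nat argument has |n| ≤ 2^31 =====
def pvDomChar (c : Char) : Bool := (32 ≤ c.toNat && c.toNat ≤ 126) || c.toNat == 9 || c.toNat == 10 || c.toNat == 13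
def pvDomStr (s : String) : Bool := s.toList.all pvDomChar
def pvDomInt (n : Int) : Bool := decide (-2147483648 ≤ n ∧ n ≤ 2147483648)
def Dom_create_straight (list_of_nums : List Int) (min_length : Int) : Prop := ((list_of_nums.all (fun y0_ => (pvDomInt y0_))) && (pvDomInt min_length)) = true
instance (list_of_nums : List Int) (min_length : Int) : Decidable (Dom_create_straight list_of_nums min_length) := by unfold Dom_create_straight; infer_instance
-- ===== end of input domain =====

-- B replaces A's per-start rescans by one pass over the sorted list that finds each maximal
-- consecutive run once and emits the qualifying windows directly by value arithmetic
-- (objective: alternative; identical output everywhere).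
-- Both programs are generators in Python; the proof is about the list of yielded values.

-- ===== PORT A =====
-- inner 'for end in range(start, lens)' loop; returning [] is the 'break'
def csA_inner (a : List Int) (start min_length : Int) : List Int → List (List Int)
  | [] => []
  | e :: rest =>
    if PySem.List.pyGetD a e 0 - PySem.List.pyGetD a start 0 ≠ e - start then []
    else if e - start ≥ min_length - 1 then
      PySem.List.pyRange (PySem.List.pyGetD a start 0) (PySem.List.pyGetD a e 0 + 1) 1
        :: csA_inner a start min_length rest
    else csA_inner a start min_length rest

def create_straight (list_of_nums : List Int) (min_length : Int) : List (List Int) :=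
  let a := PySem.List.sorted list_of_nums (fun x => x) false
  let lens : Int := a.length
  (PySem.List.pyRange 0 lens 1).flatMap
    (fun start => csA_inner a start min_length (PySem.List.pyRange start lens 1))

-- ===== PORT B =====
-- 'for s in range(lo, top+1): for e in range(s+need-1, top+1): yield list(range(s, e+1))'
def csB_emit (need lo top : Int) : List (List Int) :=
  (PySem.List.pyRange lo (top + 1) 1).flatMap (fun s =>
    (PySem.List.pyRange (s + need - 1) (top + 1) 1).map (fun e =>
      PySem.List.pyRange s (e + 1) 1))

-- the single pass over the sorted list: extend the current run [lo, top] or flush it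
def csB_go (need lo top : Int) : List Int → List (List Int)
  | [] => csB_emit need lo top
  | x :: xs =>
    if x = top + 1 then csB_go need lo x xs
    else csB_emit need lo top ++ csB_go need x x xs

def create_straight_alt (list_of_nums : List Int) (min_length : Int) : List (List Int) :=
  let a := PySem.List.sorted list_of_nums (fun x => x) false
  let need := max min_length 1
  match a with
  | [] => []
  | x :: xs => csB_go need x x xs

-- ===== PRECONDITION & SPEC =====
def Spec_create_straight (list_of_nums : List Int) (min_length : Int) (out : List (List Int)) : Prop := out = create_straight_alt list_of_nums min_length
instance (list_of_nums : List Int) (min_length : Int) (out : List (List Int)) : Decidable (Spec_create_straight list_of_nums min_length out) := by unfold Spec_create_straight; infer_instance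

-- ===== CLAIM (what is proved, stated in full; the proofs are below) =====
def Claim_equal_create_straight : Prop := ∀ (list_of_nums : List Int) (min_length : Int), Dom_create_straight list_of_nums min_length → Spec_create_straight list_of_nums min_length (create_straight list_of_nums min_length)

-- ===== LEMMAS AND PROOFS =====

-- A's outer loop over an arbitrary list a (create_straight after sorting)
def Acore (a : List Int) (m : Int) : List (List Int) :=
  (PySem.List.pyRange 0 (a.length : Int) 1).flatMap
    (fun s => csA_inner a s m (PySem.List.pyRange s (a.length : Int) 1))

-- B's pass over an arbitrary list a (create_straight_alt after sorting)
def Btop (need : Int) : List Int → List (List Int)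
  | [] => []
  | x :: xs => csB_go need x x xs

-- length of the chain of +1 steps continuing after value t
def runLen : Int → List Int → Nat
  | _, [] => 0
  | t, y :: ys => if y = t + 1 then runLen y ys + 1 else 0

theorem run_split (xs : List Int) : ∀ x : Int,
    x :: xs = PySem.List.pyRange x (x + 1 + runLen x xs) 1 ++ xs.drop (runLen x xs) := by
  induction xs with
  | nil => intro x; simp [runLen, PySem.List.pyRange_one_singleton]
  | cons y ys ih =>
    intro x
    by_cases h : y = x + 1
    · subst h
      simp only [runLen]
      push_cast
      rw [show x + 1 + ((runLen (x+1) ys : Int) + 1) = (x+1) + 1 + (runLen (x+1) ys : Int) by ring]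
      rw [PySem.List.pyRange_one_cons (by omega)]
      simp only [List.cons_append]
      congr 1
      rw [List.drop_succ_cons]
      exact ih (x+1)
    · simp [runLen, h, PySem.List.pyRange_one_singleton]

theorem run_break (xs : List Int) : ∀ (x e : Int) (rest : List Int),
    xs.drop (runLen x xs) = e :: rest → e ≠ x + 1 + runLen x xs := by
  induction xs with
  | nil => intro x e rest h; simp [runLen] at h
  | cons y ys ih =>
    intro x e rest h
    by_cases hy : y = x + 1
    · subst hy
      simp only [runLen] at h ⊢
      have := ih (x+1) e rest h
      push_cast
      intro hc; apply this; omega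
    · simp only [runLen, if_neg hy, List.drop_zero] at h ⊢
      cases h
      push_cast
      omega

theorem csA_inner_eq (a : List Int) (s m : Int) (es : List Int) :
    csA_inner a s m es =
      ((es.takeWhile (fun e => decide (PySem.List.pyGetD a e 0 - PySem.List.pyGetD a s 0 = e - s))).filter
        (fun e => decide (m - 1 ≤ e - s))).map
        (fun e => PySem.List.pyRange (PySem.List.pyGetD a s 0) (PySem.List.pyGetD a e 0 + 1) 1) := by
  induction es with
  | nil => rfl
  | cons e rest ih =>
    simp only [csA_inner]
    by_cases h : PySem.List.pyGetD a e 0 - PySem.List.pyGetD a s 0 = e - s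
    · rw [if_neg (not_not_intro h), List.takeWhile_cons_of_pos (by simpa using h)]
      by_cases h2 : m - 1 ≤ e - s
      · rw [if_pos (by omega), List.filter_cons_of_pos (by simpa using h2), List.map_cons, ih]
      · rw [if_neg (by omega), List.filter_cons_of_neg (by simpa using h2), ih]
    · rw [if_pos h, List.takeWhile_cons_of_neg (by simpa using h)]
      rfl

theorem filter_le_pyRange_aux (k c : Int) : ∀ (n : Nat) (t : Int), (k - t).toNat = n →
    (PySem.List.pyRange t k 1).filter (fun e => decide (c ≤ e)) = PySem.List.pyRange (max t c) k 1 := by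
  intro n
  induction n with
  | zero =>
    intro t h
    rw [PySem.List.pyRange_one_eq_nil (by omega), PySem.List.pyRange_one_eq_nil (by omega)]
    rfl
  | succ n ih =>
    intro t h
    rw [PySem.List.pyRange_one_cons (by omega)]
    by_cases hc : c ≤ t
    · rw [List.filter_cons_of_pos (by simpa using hc), ih (t+1) (by omega)]
      rw [show max t c = t by omega, show max (t+1) c = t+1 by omega,
        PySem.List.pyRange_one_cons (a := t) (b := k) (by omega)]
    · rw [List.filter_cons_of_neg (by simpa using hc), ih (t+1) (by omega)]
      congr 1
      omega

theorem filter_le_pyRange (t k c : Int) :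
    (PySem.List.pyRange t k 1).filter (fun e => decide (c ≤ e)) = PySem.List.pyRange (max t c) k 1 :=
  filter_le_pyRange_aux k c _ t rfl

theorem map_add_pyRange (c a b : Int) :
    (PySem.List.pyRange a b 1).map (fun t => c + t) = PySem.List.pyRange (c + a) (c + b) 1 := by
  rw [PySem.List.pyRange_one, PySem.List.pyRange_one,
    show c + b - (c + a) = b - a by ring, List.map_map]
  exact List.map_congr_left (fun x hx => by simp [Function.comp]; ring)

theorem takeWhile_append_of (p : Int → Bool) (l1 l2 : List Int)
    (h1 : ∀ e ∈ l1, p e = true) (h2 : ∀ e rest, l2 = e :: rest → p e = false) :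
    (l1 ++ l2).takeWhile p = l1 := by
  induction l1 with
  | nil =>
    cases l2 with
    | nil => rfl
    | cons e rest => simp [h2 e rest rfl]
  | cons x l1 ih =>
    rw [List.cons_append, List.takeWhile_cons_of_pos (h1 x (by simp))]
    rw [ih (fun e he => h1 e (by simp [he]))]

-- pyGetD at a nonnegative index is getD
theorem pyGetD_toNat (xs : List Int) (i : Int) (d : Int) (h : 0 ≤ i) :
    PySem.List.pyGetD xs i d = xs.getD i.toNat d := by
  have := PySem.List.pyGetD_natCast (xs := xs) (n := i.toNat) (d := d)
  rwa [Int.toNat_of_nonneg h] at this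

-- index inside the leading run r = pyRange x (x+1+rl) 1
theorem idx_run (x : Int) (rl : Nat) (b : List Int) (i : Int) (h0 : 0 ≤ i) (hi : i < 1 + rl) :
    PySem.List.pyGetD (PySem.List.pyRange x (x + 1 + rl) 1 ++ b) i 0 = x + i := by
  rw [pyGetD_toNat _ _ _ h0,
    List.getD_append _ _ _ _ (by rw [PySem.List.length_pyRange_one]; omega),
    List.getD_eq_getElem _ _ (by rw [PySem.List.length_pyRange_one]; omega)]
  rw [PySem.List.getElem_pyRange_one]
  omega

-- index past the leading run
theorem idx_shift (x : Int) (rl : Nat) (b : List Int) (i : Int) (h0 : 0 ≤ i) :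
    PySem.List.pyGetD (PySem.List.pyRange x (x + 1 + rl) 1 ++ b) ((1 + rl : Nat) + i) 0 =
      PySem.List.pyGetD b i 0 := by
  rw [pyGetD_toNat _ _ _ (by omega), pyGetD_toNat _ _ _ h0,
    List.getD_append_right _ _ _ _ (by rw [PySem.List.length_pyRange_one]; omega)]
  congr 1
  rw [PySem.List.length_pyRange_one]
  omega

-- shifted inner loop reads only the tail
theorem csA_inner_shift (x : Int) (rl : Nat) (b : List Int) (s m : Int) (h0 : 0 ≤ s) :
    ∀ es : List Int, (∀ e ∈ es, 0 ≤ e) →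
    csA_inner (PySem.List.pyRange x (x + 1 + rl) 1 ++ b) ((1 + rl : Nat) + s) m
      (es.map (fun t => ((1 + rl : Nat) : Int) + t)) = csA_inner b s m es := by
  intro es
  induction es with
  | nil => intro _; rfl
  | cons e rest ih =>
    intro he
    have h0e : (0:Int) ≤ e := he e (by simp)
    simp only [List.map_cons, csA_inner]
    rw [idx_shift x rl b e h0e, idx_shift x rl b s h0]
    rw [show ((1 + rl : Nat) : Int) + e - (((1 + rl : Nat) : Int) + s) = e - s by ring]
    rw [ih (fun t ht => he t (by simp [ht]))]

-- B: consuming the rest of the current run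
theorem csB_go_run (need lo : Int) : ∀ (xs : List Int) (top : Int),
    csB_go need lo top xs =
      csB_emit need lo (top + runLen top xs) ++ Btop need (xs.drop (runLen top xs)) := by
  intro xs
  induction xs with
  | nil => intro top; simp [csB_go, runLen, Btop]
  | cons y ys ih =>
    intro top
    by_cases h : y = top + 1
    · subst h
      rw [show csB_go need lo top ((top+1) :: ys) = csB_go need lo (top+1) ys from by
        simp [csB_go]]
      rw [ih (top+1),
        show runLen top ((top+1) :: ys) = runLen (top+1) ys + 1 from by simp [runLen],
        List.drop_succ_cons]
      congr 2
      push_cast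
      ring
    · rw [show csB_go need lo top (y :: ys) = csB_emit need lo top ++ csB_go need y y ys from by
        simp [csB_go, h],
        show runLen top (y :: ys) = 0 from by simp [runLen, h],
        List.drop_zero,
        show Btop need (y :: ys) = csB_go need y y ys from rfl]
      norm_num

theorem Acore_peel (m : Int) (x : Int) (xs : List Int) :
    Acore (x :: xs) m =
      csB_emit (max m 1) x (x + runLen x xs) ++ Acore (xs.drop (runLen x xs)) m := by
  set rl := runLen x xs with hrl
  set b := xs.drop rl with hb
  set k : Nat := 1 + rl with hk
  have hsplit : x :: xs = PySem.List.pyRange x (x + 1 + rl) 1 ++ b := run_split xs x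
  have hlenr : (PySem.List.pyRange x (x + 1 + rl) 1).length = k := by
    rw [PySem.List.length_pyRange_one]; omega
  have hlen : (x :: xs).length = k + b.length := by
    rw [hsplit, List.length_append, hlenr]
  -- the break fact: if b is nonempty its head is not x + k
  have hbreak : ∀ hb₀ tb, b = hb₀ :: tb → hb₀ ≠ x + 1 + rl := by
    intro hb₀ tb hcons
    exact run_break xs x hb₀ tb (hcons ▸ rfl)
  -- index facts
  have hidxr : ∀ i : Int, 0 ≤ i → i < (k : Int) → PySem.List.pyGetD (x :: xs) i 0 = x + i := by
    intro i h0 hik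
    rw [hsplit]; exact idx_run x rl b i h0 (by omega)
  have hidxs : ∀ i : Int, 0 ≤ i → PySem.List.pyGetD (x :: xs) ((k : Int) + i) 0 = PySem.List.pyGetD b i 0 := by
    intro i h0
    rw [hsplit]
    have := idx_shift x rl b i h0
    simpa [hk] using this
  -- split the outer range at k
  unfold Acore
  rw [hlen]
  rw [show (((k + b.length : Nat)) : Int) = (k : Int) + (b.length : Int) by push_cast; ring]
  rw [PySem.List.pyRange_one_append 0 (k : Int) ((k : Int) + (b.length : Int)) (by omega) (by omega)]
  rw [List.flatMap_append]
  congr 1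
  -- ===== part (i): the first run's starts give csB_emit =====
  · unfold csB_emit
    rw [show x + (rl : Int) + 1 = x + (k : Int) by omega]
    rw [show PySem.List.pyRange x (x + (k : Int)) 1
        = (PySem.List.pyRange 0 (k : Int) 1).map (fun t => x + t) from by
      rw [map_add_pyRange]; ring_nf]
    rw [List.flatMap_map]
    apply List.flatMap_congr
    intro s hs
    rw [PySem.List.mem_pyRange_one] at hs
    obtain ⟨hs0, hsk⟩ := hs
    -- A's inner loop for start s in the run
    rw [csA_inner_eq]
    rw [PySem.List.pyRange_one_append s (k : Int) ((k : Int) + (b.length : Int)) (by omega) (by omega)]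
    rw [takeWhile_append_of _ _ _
      (by
        intro e he
        rw [PySem.List.mem_pyRange_one] at he
        rw [hidxr e (by omega) (by omega), hidxr s hs0 hsk]
        simp)
      (by
        intro e rest heq
        have hkn : (k : Int) < (k : Int) + (b.length : Int) := by
          by_contra hc
          rw [PySem.List.pyRange_one_eq_nil (by omega)] at heq
          simp at heq
        rw [PySem.List.pyRange_one_cons hkn] at heq
        have hek : e = (k : Int) := (List.cons.injEq _ _ _ _ ▸ heq).1.symm
        subst hek
        match hbc : b with
        | [] => simp at hkn
        | hb0 :: tb =>
          have hne := hbreak hb0 tb rfl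
          have hget : PySem.List.pyGetD (x :: xs) ((k : Int)) 0 = hb0 := by
            have := hidxs 0 (le_refl 0)
            rw [add_zero] at this
            rw [this, PySem.List.pyGetD_zero_cons]
          rw [hget, hidxr s hs0 hsk]
          simp only [decide_eq_false_iff_not]
          intro hc
          apply hne
          omega)]
    rw [List.filter_congr
      (show ∀ e ∈ PySem.List.pyRange s (k : Int) 1,
          (fun e => decide (m - 1 ≤ e - s)) e = (fun e => decide (s + m - 1 ≤ e)) e from by
        intro e he; simp only [decide_eq_decide]; omega)]
    rw [filter_le_pyRange]
    rw [show max s (s + m - 1) = s + max m 1 - 1 by omega]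
    rw [show PySem.List.pyRange (x + s + max m 1 - 1) (x + (k : Int)) 1
        = (PySem.List.pyRange (s + max m 1 - 1) (k : Int) 1).map (fun t => x + t) from by
      rw [map_add_pyRange]; ring_nf]
    rw [List.map_map]
    apply List.map_congr_left
    intro e he
    rw [PySem.List.mem_pyRange_one] at he
    rw [hidxr e (by omega) (by omega), hidxr s hs0 hsk]
    simp [Function.comp]
  -- ===== part (ii): starts past the run are Acore of the tail =====
  · rw [show PySem.List.pyRange (k : Int) ((k : Int) + (b.length : Int)) 1
        = (PySem.List.pyRange 0 (b.length : Int) 1).map (fun t => (k : Int) + t) from by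
      rw [map_add_pyRange]; ring_nf]
    rw [List.flatMap_map]
    apply List.flatMap_congr
    intro s hs
    rw [PySem.List.mem_pyRange_one] at hs
    obtain ⟨hs0, hsn⟩ := hs
    rw [show PySem.List.pyRange ((k : Int) + s) ((k : Int) + (b.length : Int)) 1
        = (PySem.List.pyRange s (b.length : Int) 1).map (fun t => (k : Int) + t) from by
      rw [map_add_pyRange]]
    have := csA_inner_shift x rl b s m hs0 (PySem.List.pyRange s (b.length : Int) 1)
      (by intro e he; rw [PySem.List.mem_pyRange_one] at he; omega)
    rw [hsplit]
    simpa [hk] using this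

theorem main_core (m : Int) : ∀ a : List Int, Acore a m = Btop (max m 1) a := by
  intro a
  induction hn : a.length using Nat.strong_induction_on generalizing a with
  | _ n ih =>
  match a with
  | [] => simp [Acore, Btop, PySem.List.pyRange_one_eq_nil (le_refl 0)]
  | x :: xs =>
    rw [Acore_peel m x xs,
      show Btop (max m 1) (x :: xs) = csB_go (max m 1) x x xs from rfl,
      csB_go_run (max m 1) x xs x]
    congr 1
    exact ih (xs.drop (runLen x xs)).length
      (by rw [← hn]; simp only [List.length_drop, List.length_cons]; omega)
      _ rfl

-- ===== VERDICT (by name: the statement is the Claim_ definition above) =====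
theorem create_straight_spec : Claim_equal_create_straight := by
  intro l m _
  unfold Spec_create_straight create_straight create_straight_alt
  have h := main_core m (PySem.List.sorted l (fun x => x) false)
  unfold Acore Btop at h
  simpa using h
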